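-- pv_equiv track=rewrite | github.com/WSEmma/Car-detecting | check_rglight.py | findLeft
-- ===== SOURCE A (Python) =====
-- def findLeft(pt,Tg1,Tg2,gray):
--     m = pt[0] - 1
--     if m >= 0:
--         gs = gray[pt[1]][m]
--         point = (m,pt[1])
--         if(gs < Tg1):
--             m = findLeft(point,Tg1,Tg2,gray)
--         elif(gs < Tg2):
--             m = findLeft(point,Tg1,Tg2,gray)
--         else:
--             m = pt[0]
--     else:
--         m = pt[0]
--     return m
-- ===== SOURCE B (Python) =====
-- def findLeft(pt, Tg1, Tg2, gray):
--     # Iterative leftward scan (explicit loop instead of A's tail recursion).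
--     x, y = pt
--     while True:
--         m = x - 1
--         if m < 0:
--             return x
--         gs = gray[y][m]
--         if gs < Tg1 or gs < Tg2:
--             x = m
--         else:
--             return x
-- ===== Notes on version B (the rewrite author's own statement) =====
-- stated objective: simpler
-- what changed: Replaced A's tail recursion (which rebuilds a point tuple per step and hits Python's recursion limit on long scans) with an explicit while-loop over the column index, keeping the exact two-part threshold disjunction.
-- outside the precondition, e.g. on findLeft((2, 0), 5, 5, [[1]]): A raises IndexError, B raises IndexError
import Mathlib
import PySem

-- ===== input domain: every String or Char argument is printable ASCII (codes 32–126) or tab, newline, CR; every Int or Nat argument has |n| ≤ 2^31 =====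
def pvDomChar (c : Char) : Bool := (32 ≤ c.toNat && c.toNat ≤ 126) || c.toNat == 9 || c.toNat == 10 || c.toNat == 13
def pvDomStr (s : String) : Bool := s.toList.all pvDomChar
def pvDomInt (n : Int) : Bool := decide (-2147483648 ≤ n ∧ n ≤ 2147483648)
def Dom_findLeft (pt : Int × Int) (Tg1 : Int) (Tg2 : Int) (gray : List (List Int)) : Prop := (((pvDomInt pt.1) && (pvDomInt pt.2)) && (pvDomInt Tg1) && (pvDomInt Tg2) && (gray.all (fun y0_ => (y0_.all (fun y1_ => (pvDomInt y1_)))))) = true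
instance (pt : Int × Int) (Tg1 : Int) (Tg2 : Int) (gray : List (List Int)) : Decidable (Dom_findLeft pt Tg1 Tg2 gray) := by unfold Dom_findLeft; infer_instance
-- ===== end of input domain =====

-- ===== PORT A =====
-- Literal port of A: tail recursion on the point, same branch order.
def findLeft (pt : Int × Int) (Tg1 : Int) (Tg2 : Int) (gray : List (List Int)) : Int :=
  let m := pt.1 - 1
  if h : m ≥ 0 then
    match (PySem.List.pyGet? gray pt.2).bind (fun row => PySem.List.pyGet? row m) with
    | none => 0  -- Python raises IndexError here; excluded by Pre_findLeft
    | some gs =>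
      if gs < Tg1 then findLeft (m, pt.2) Tg1 Tg2 gray
      else if gs < Tg2 then findLeft (m, pt.2) Tg1 Tg2 gray
      else pt.1
  else pt.1
termination_by pt.1.toNat
decreasing_by omega

-- ===== PORT B =====
-- Port of B: the while-loop, as a tail-recursive loop over the column index x.
def findLeftLoop (x : Int) (y : Int) (Tg1 : Int) (Tg2 : Int) (gray : List (List Int)) : Int :=
  let m := x - 1
  if h : m < 0 then x
  else
    match (PySem.List.pyGet? gray y).bind (fun row => PySem.List.pyGet? row m) with
    | none => 0  -- Python raises IndexError here; excluded by Pre_findLeft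
    | some gs =>
      if gs < Tg1 ∨ gs < Tg2 then findLeftLoop m y Tg1 Tg2 gray else x
termination_by x.toNat
decreasing_by omega

def findLeft_alt (pt : Int × Int) (Tg1 : Int) (Tg2 : Int) (gray : List (List Int)) : Int :=
  findLeftLoop pt.1 pt.2 Tg1 Tg2 gray

-- ===== PRECONDITION & SPEC =====
-- Pre_ excludes exactly the inputs where A raises IndexError: the scan starts at
-- column pt.1-1, so A returns normally iff pt.1 ≤ 0 or row pt.2 exists (Python
-- index, negative wraps) and has length ≥ pt.1.
def Pre_findLeft (pt : Int × Int) (Tg1 : Int) (Tg2 : Int) (gray : List (List Int)) : Prop :=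
  pt.1 ≤ 0 ∨ ((PySem.List.pyGet? gray pt.2).isSome ∧
    pt.1 ≤ (((PySem.List.pyGet? gray pt.2).getD []).length : Int))
instance (pt : Int × Int) (Tg1 : Int) (Tg2 : Int) (gray : List (List Int)) : Decidable (Pre_findLeft pt Tg1 Tg2 gray) := by unfold Pre_findLeft; infer_instance
def pvWitness_findLeft : (Int × Int) × Int × Int × List (List Int) := ((3, 0), 5, 9, [[1, 2, 3, 10]])

def Spec_findLeft (pt : Int × Int) (Tg1 : Int) (Tg2 : Int) (gray : List (List Int)) (out : Int) : Prop := out = findLeft_alt pt Tg1 Tg2 gray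
instance (pt : Int × Int) (Tg1 : Int) (Tg2 : Int) (gray : List (List Int)) (out : Int) : Decidable (Spec_findLeft pt Tg1 Tg2 gray out) := by unfold Spec_findLeft; infer_instance

-- ===== CLAIM (what is proved, stated in full; the proofs are below) =====
def Claim_equal_findLeft : Prop := ∀ (pt : Int × Int) (Tg1 : Int) (Tg2 : Int) (gray : List (List Int)), Dom_findLeft pt Tg1 Tg2 gray → Pre_findLeft pt Tg1 Tg2 gray → Spec_findLeft pt Tg1 Tg2 gray (findLeft pt Tg1 Tg2 gray)

-- ===== LEMMAS AND PROOFS =====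

lemma findLeft_eq_loop (n : Nat) : ∀ (x y Tg1 Tg2 : Int) (gray : List (List Int)),
    x.toNat = n →
    (x ≤ 0 ∨ ((PySem.List.pyGet? gray y).isSome ∧
      x ≤ (((PySem.List.pyGet? gray y).getD []).length : Int))) →
    findLeft (x, y) Tg1 Tg2 gray = findLeftLoop x y Tg1 Tg2 gray := by
  induction n using Nat.strong_induction_on with
  | _ n ih =>
    intro x y Tg1 Tg2 gray hn hpre
    rw [findLeft.eq_def, findLeftLoop.eq_def]
    simp only []
    by_cases hx : x - 1 ≥ 0
    · simp only [hx, dif_pos, dif_neg (by omega : ¬ x - 1 < 0)]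
      rcases hpre with h0 | ⟨hsome, hlen⟩
      · omega
      · obtain ⟨row, hrow⟩ := Option.isSome_iff_exists.mp hsome
        rw [hrow] at hlen
        simp only [Option.getD_some] at hlen
        obtain ⟨gs, hget⟩ : ∃ gs, PySem.List.pyGet? row (x - 1) = some gs :=
          ⟨_, PySem.List.pyGet?_eq_some_getElem row (by omega) (by omega)⟩
        rw [hrow]
        simp only [Option.bind, hget]
        have hrec : findLeft (x - 1, y) Tg1 Tg2 gray = findLeftLoop (x - 1) y Tg1 Tg2 gray := by
          apply ih (x - 1).toNat (by omega) _ _ _ _ _ rfl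
          right
          refine ⟨hsome, ?_⟩
          rw [hrow]
          simp only [Option.getD_some]
          omega
        by_cases h1 : gs < Tg1
        · simp [h1, hrec]
        · by_cases h2 : gs < Tg2
          · simp [h1, h2, hrec]
          · simp [h1, h2]
    · simp only [dif_neg hx, dif_pos (by omega : x - 1 < 0)]

-- ===== VERDICT (by name: the statement is the Claim_ definition above) =====
theorem findLeft_spec : Claim_equal_findLeft := by
  intro pt Tg1 Tg2 gray _ hpre
  unfold Spec_findLeft findLeft_alt
  exact findLeft_eq_loop pt.1.toNat pt.1 pt.2 Tg1 Tg2 gray rfl hpre
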